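-- pv_equiv track=rewrite | github.com/DanielSun94/CFPA | data_preprocess/adni_reader.py | data_type_identify
-- ===== SOURCE A (Python) =====
-- def data_type_identify(data, name_id_dict, miss_placeholder):
--     data_type_list = ['d'] * len(name_id_dict)
--     for p_id in data:
--         result = [visit[0] for visit in data[p_id]]
--         for visit in result:
--             for i, feature in enumerate(visit):
--                 if feature != 0 and feature != 1 and feature != miss_placeholder:
--                     data_type_list[i] = 'c'
--     data_type_dict = dict()
--     for key in name_id_dict:
--         data_type_dict[key] = data_type_list[name_id_dict[key]]
--     return data_type_dict
-- ===== SOURCE B (Python) =====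
-- def data_type_identify(data, name_id_dict, miss_placeholder):
--     def is_cont(j):
--         return any(
--             j < len(visit[0])
--             and visit[0][j] != 0
--             and visit[0][j] != 1
--             and visit[0][j] != miss_placeholder
--             for visits in data.values()
--             for visit in visits
--         )
--     types = ['c' if is_cont(j) else 'd' for j in range(len(name_id_dict))]
--     return {key: types[i] for key, i in name_id_dict.items()}
-- ===== Notes on version B (the rewrite author's own statement) =====
-- stated objective: simpler
-- what changed: B drops A's mutable accumulator list and single mutating sweep: it decides each column's type independently with one short-circuiting any() over all patient visits, builds the length-n type list as a comprehension, and returns the dict as a comprehension; Pre_ excludes only inputs where A raises IndexError (empty visit lists, feature ids outside [-n, n), non-0/1/miss features at columns >= n) plus duplicate keys in a dict-typed argument, an artefact of the association-list encoding that a Python dict cannot carry.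
import Mathlib
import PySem

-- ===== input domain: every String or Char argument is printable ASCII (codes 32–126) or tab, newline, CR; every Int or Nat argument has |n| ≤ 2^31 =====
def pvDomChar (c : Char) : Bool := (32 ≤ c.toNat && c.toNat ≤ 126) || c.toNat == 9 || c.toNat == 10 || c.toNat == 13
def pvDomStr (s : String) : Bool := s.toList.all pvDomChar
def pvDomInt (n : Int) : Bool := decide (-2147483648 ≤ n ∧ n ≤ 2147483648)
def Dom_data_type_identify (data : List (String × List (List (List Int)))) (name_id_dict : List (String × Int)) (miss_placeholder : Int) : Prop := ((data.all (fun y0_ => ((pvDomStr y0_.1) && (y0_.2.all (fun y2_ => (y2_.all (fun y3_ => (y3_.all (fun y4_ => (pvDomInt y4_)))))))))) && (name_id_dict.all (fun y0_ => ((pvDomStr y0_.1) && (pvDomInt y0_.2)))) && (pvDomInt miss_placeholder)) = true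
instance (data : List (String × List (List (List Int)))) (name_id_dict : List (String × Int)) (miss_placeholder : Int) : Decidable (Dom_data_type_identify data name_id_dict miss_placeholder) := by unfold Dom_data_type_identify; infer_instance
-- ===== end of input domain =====

-- B drops A's mutable per-column list and two-phase sweep and builds the result dict directly,
-- deciding each key's column independently with a short-circuiting scan (objective: simpler).

-- ===== PORT A =====
-- loop body of A's innermost loop: 'if feature != 0 and feature != 1 and feature != miss: data_type_list[i] = "c"'
def pvMark (miss : Int) (dtl : List String) (p : Int × Int) : List String :=
  if p.2 ≠ 0 ∧ p.2 ≠ 1 ∧ p.2 ≠ miss then PySem.List.pySetD dtl p.1 "c" else dtl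

def data_type_identify (data : List (String × List (List (List Int)))) (name_id_dict : List (String × Int)) (miss_placeholder : Int) : List (String × String) :=
  let dtl := data.foldl
    (fun dtl pv =>
      let result := pv.2.map (fun visit => PySem.List.pyGetD visit 0 [])
      result.foldl (fun dtl vec => (PySem.List.enumerate vec 0).foldl (pvMark miss_placeholder) dtl) dtl)
    (List.replicate name_id_dict.length "d")
  (name_id_dict.foldl
    (fun d kv => d.insert kv.1 (PySem.List.pyGetD dtl kv.2 "d"))
    PySem.Dict.empty).items

-- ===== PORT B =====
-- 'any(j < len(visit[0]) and visit[0][j] != 0 and visit[0][j] != 1 and visit[0][j] != miss …)'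
def pvIsContAt (data : List (String × List (List (List Int)))) (miss j : Int) : Bool :=
  data.any fun pv => pv.2.any fun visit =>
    let vec := PySem.List.pyGetD visit 0 []
    decide (j < (vec.length : Int)) && decide (PySem.List.pyGetD vec j 0 ≠ 0) &&
      decide (PySem.List.pyGetD vec j 0 ≠ 1) && decide (PySem.List.pyGetD vec j 0 ≠ miss)

def data_type_identify_alt (data : List (String × List (List (List Int)))) (name_id_dict : List (String × Int)) (miss_placeholder : Int) : List (String × String) :=
  let types := (PySem.List.pyRange 0 (name_id_dict.length : Int) 1).map
    (fun j => if pvIsContAt data miss_placeholder j then "c" else "d")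
  (name_id_dict.foldl
    (fun d kv => d.insert kv.1 (PySem.List.pyGetD types kv.2 "d"))
    PySem.Dict.empty).items

-- ===== PRECONDITION & SPEC =====
-- Pre_ excludes only inputs on which the Python A raises, plus duplicate keys in either dict-typed argument
-- (an artefact of the assoc-list encoding — a Python dict cannot carry them): empty visit lists (IndexError on
-- visit[0]); feature ids outside [-n, n) where n = len(name_id_dict) (IndexError on data_type_list[id]); and
-- feature vectors with a non-0/1/miss value at a column ≥ n (IndexError on data_type_list[i] = 'c').
def Pre_data_type_identify (data : List (String × List (List (List Int)))) (name_id_dict : List (String × Int)) (miss_placeholder : Int) : Prop :=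
  (data.map Prod.fst).Nodup ∧ (name_id_dict.map Prod.fst).Nodup ∧
  (∀ pv ∈ data, ∀ v ∈ pv.2, v ≠ []) ∧
  (∀ kv ∈ name_id_dict, -(name_id_dict.length : Int) ≤ kv.2 ∧ kv.2 < (name_id_dict.length : Int)) ∧
  (∀ pv ∈ data, ∀ v ∈ pv.2, ∀ f ∈ (v.headD []).drop name_id_dict.length,
      f = 0 ∨ f = 1 ∨ f = miss_placeholder)
instance (data : List (String × List (List (List Int)))) (name_id_dict : List (String × Int)) (miss_placeholder : Int) : Decidable (Pre_data_type_identify data name_id_dict miss_placeholder) := by unfold Pre_data_type_identify; infer_instance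

def pvWitness_data_type_identify : (List (String × List (List (List Int)))) × (List (String × Int)) × Int :=
  ([("p", [[[5, 0], [1]]])], [("k", 0), ("m", 1)], 9)

def Spec_data_type_identify (data : List (String × List (List (List Int)))) (name_id_dict : List (String × Int)) (miss_placeholder : Int) (out : List (String × String)) : Prop := out = data_type_identify_alt data name_id_dict miss_placeholder
instance (data : List (String × List (List (List Int)))) (name_id_dict : List (String × Int)) (miss_placeholder : Int) (out : List (String × String)) : Decidable (Spec_data_type_identify data name_id_dict miss_placeholder out) := by unfold Spec_data_type_identify; infer_instance

-- ===== CLAIM (what is proved, stated in full; the proofs are below) =====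
def Claim_equal_data_type_identify : Prop := ∀ (data : List (String × List (List (List Int)))) (name_id_dict : List (String × Int)) (miss_placeholder : Int), Dom_data_type_identify data name_id_dict miss_placeholder → Pre_data_type_identify data name_id_dict miss_placeholder → Spec_data_type_identify data name_id_dict miss_placeholder (data_type_identify data name_id_dict miss_placeholder)

-- ===== LEMMAS AND PROOFS =====

-- B's per-column test, at a Nat column index
def pvContAtN (miss : Int) (vec : List Int) (j : Nat) : Bool :=
  decide (j < vec.length) && decide (vec.getD j 0 ≠ 0) && decide (vec.getD j 0 ≠ 1) &&
    decide (vec.getD j 0 ≠ miss)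

theorem length_mark_fold (miss : Int) (L : List (Int × Int)) (dtl : List String) :
    (L.foldl (pvMark miss) dtl).length = dtl.length := by
  induction L generalizing dtl with
  | nil => rfl
  | cons p L ih =>
    simp only [List.foldl_cons, pvMark]
    split <;> simp [ih, PySem.List.length_pySetD]

-- unrolled characterisation of A's innermost loop
theorem getD_mark_fold (miss : Int) (L : List (Int × Int)) (hL : ∀ p ∈ L, 0 ≤ p.1)
    (dtl : List String) (j : Nat) (hj : j < dtl.length) (d : String) :
    (L.foldl (pvMark miss) dtl).getD j d =
      if L.any (fun p => p.1 == (j : Int) && (decide (p.2 ≠ 0) && decide (p.2 ≠ 1) && decide (p.2 ≠ miss)))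
      then "c" else dtl.getD j d := by
  induction L generalizing dtl with
  | nil => simp
  | cons p L ih =>
    have hp : 0 ≤ p.1 := hL p (by simp)
    have hL' : ∀ q ∈ L, 0 ≤ q.1 := fun q hq => hL q (by simp [hq])
    simp only [List.foldl_cons, List.any_cons]
    by_cases hc : p.2 ≠ 0 ∧ p.2 ≠ 1 ∧ p.2 ≠ miss
    · have hset : pvMark miss dtl p = dtl.set p.1.toNat "c" := by
        simp only [pvMark, if_pos hc, PySem.List.pySetD_of_nonneg dtl "c" hp]
      rw [hset, ih hL' _ (by simp [hj])]
      have e0 : decide (p.2 ≠ 0) = true := by simp [hc.1]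
      have e1 : decide (p.2 ≠ 1) = true := by simp [hc.2.1]
      have e2 : decide (p.2 ≠ miss) = true := by simp [hc.2.2]
      simp only [e0, e1, e2, Bool.and_true]
      by_cases hij : p.1 = (j : Int)
      · have hjj : p.1.toNat = j := by omega
        have hv : (dtl.set p.1.toNat "c").getD j d = "c" := by
          rw [hjj]; simp [List.getD_eq_getElem?_getD, hj]
        have ht : (p.1 == (j : Int)) = true := by simp [hij]
        have hvv : (dtl.set p.1.toNat "c")[j]?.getD d = "c" := by
          rw [← List.getD_eq_getElem?_getD]; exact hv
        simp [ht, hvv, List.getD_eq_getElem?_getD]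
      · have hv : (dtl.set p.1.toNat "c").getD j d = dtl.getD j d := by
          have hne : p.1.toNat ≠ j := by omega
          simp [List.getD_eq_getElem?_getD, List.getElem?_set_ne hne]
        have ht : (p.1 == (j : Int)) = false := by simp [hij]
        simp only [hv, ht, Bool.false_or]
    · have hskip : pvMark miss dtl p = dtl := by simp only [pvMark, if_neg hc]
      rw [hskip, ih hL' _ hj]
      have hhead : (p.1 == (j : Int) && (decide (p.2 ≠ 0) && decide (p.2 ≠ 1) && decide (p.2 ≠ miss)))
          = false := by
        by_cases h0 : p.2 = 0
        · simp [h0]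
        · by_cases h1 : p.2 = 1
          · simp [h1]
          · have hm : p.2 = miss := by tauto
            simp [hm]
      simp only [hhead, Bool.false_or]

theorem enumerate_nonneg (vec : List Int) (s : Nat) :
    ∀ p ∈ PySem.List.enumerate vec (s : Int), 0 ≤ p.1 := by
  induction vec generalizing s with
  | nil => simp [PySem.List.enumerate_nil]
  | cons x xs ih =>
    intro p hp
    rw [PySem.List.enumerate_cons] at hp
    rcases List.mem_cons.mp hp with h | h
    · simp [h]
    · exact ih (s + 1) p (by exact_mod_cast h)

-- 'index i hits column j' over an enumerate, as a direct lookup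
theorem any_enumerate_eq {α : Type} (vec : List α) (s j : Nat) (q : α → Bool) (d : α) :
    (PySem.List.enumerate vec (s : Int)).any (fun p => p.1 == (j : Int) && q p.2) =
      (decide (s ≤ j) && decide (j - s < vec.length) && q (vec.getD (j - s) d)) := by
  induction vec generalizing s with
  | nil => simp [PySem.List.enumerate_nil]
  | cons x xs ih =>
    rw [PySem.List.enumerate_cons, List.any_cons]
    have hs1 : ((s : Int) + 1) = ((s + 1 : Nat) : Int) := by push_cast; ring
    rw [hs1, ih (s + 1)]
    by_cases hsj : s = j
    · subst hsj
      simp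
    · by_cases hle : s ≤ j
      · have h1 : s + 1 ≤ j := by omega
        have h2 : ((s : Int) == (j : Int)) = false := by
          simp [hsj]
        have h3 : j - s = (j - (s + 1)) + 1 := by omega
        simp only [h2, Bool.false_and, Bool.false_or, h3, List.getD_cons_succ,
          List.length_cons]
        have h4 : decide (s ≤ j) = true := by simp [hle]
        have h5 : decide (s + 1 ≤ j) = true := by simp [h1]
        have h6 : decide (j - (s + 1) + 1 < xs.length + 1) = decide (j - (s + 1) < xs.length) := by
          simp
        rw [h4, h5, h6]
      · have h2 : ((s : Int) == (j : Int)) = false := by simp [hsj]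
        have h4 : decide (s ≤ j) = false := by simp [hle]
        have h5 : decide (s + 1 ≤ j) = false := by
          have : ¬ (s + 1 ≤ j) := by omega
          simp [this]
        simp only [h2, h4, h5, Bool.false_and, Bool.false_or]

-- A's innermost loop marks column j iff B's per-column test fires on this vector
theorem getD_mark_enum (miss : Int) (vec : List Int) (dtl : List String) (j : Nat)
    (hj : j < dtl.length) (d : String) :
    ((PySem.List.enumerate vec 0).foldl (pvMark miss) dtl).getD j d =
      if pvContAtN miss vec j then "c" else dtl.getD j d := by
  have h0 : (0 : Int) = ((0 : Nat) : Int) := rfl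
  rw [h0, getD_mark_fold miss _ (enumerate_nonneg vec 0) dtl j hj d]
  rw [any_enumerate_eq vec 0 j (fun f => decide (f ≠ 0) && decide (f ≠ 1) && decide (f ≠ miss)) 0]
  simp [pvContAtN, Bool.and_assoc]

theorem length_vecs_fold (miss : Int) (vecs : List (List Int)) (dtl : List String) :
    (vecs.foldl (fun dtl vec => (PySem.List.enumerate vec 0).foldl (pvMark miss) dtl) dtl).length
      = dtl.length := by
  induction vecs generalizing dtl with
  | nil => rfl
  | cons v vs ih => simp [ih, length_mark_fold]

theorem getD_vecs_fold (miss : Int) (vecs : List (List Int)) (dtl : List String) (j : Nat)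
    (hj : j < dtl.length) (d : String) :
    (vecs.foldl (fun dtl vec => (PySem.List.enumerate vec 0).foldl (pvMark miss) dtl) dtl).getD j d =
      if vecs.any (fun vec => pvContAtN miss vec j) then "c" else dtl.getD j d := by
  induction vecs generalizing dtl with
  | nil => simp
  | cons v vs ih =>
    simp only [List.foldl_cons, List.any_cons]
    rw [ih _ (by simp [length_mark_fold, hj]), getD_mark_enum miss v dtl j hj d]
    by_cases h : pvContAtN miss v j = true <;> simp [h]

theorem length_data_fold (miss : Int) (data : List (String × List (List (List Int))))
    (dtl : List String) :
    (data.foldl (fun dtl pv =>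
        (pv.2.map (fun visit => PySem.List.pyGetD visit 0 [])).foldl
          (fun dtl vec => (PySem.List.enumerate vec 0).foldl (pvMark miss) dtl) dtl) dtl).length
      = dtl.length := by
  induction data generalizing dtl with
  | nil => rfl
  | cons pv ps ih => simp [ih, length_vecs_fold]

theorem getD_data_fold (miss : Int) (data : List (String × List (List (List Int))))
    (dtl : List String) (j : Nat) (hj : j < dtl.length) (d : String) :
    (data.foldl (fun dtl pv =>
        (pv.2.map (fun visit => PySem.List.pyGetD visit 0 [])).foldl
          (fun dtl vec => (PySem.List.enumerate vec 0).foldl (pvMark miss) dtl) dtl) dtl).getD j d =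
      if data.any (fun pv => pv.2.any (fun visit => pvContAtN miss (PySem.List.pyGetD visit 0 []) j))
      then "c" else dtl.getD j d := by
  induction data generalizing dtl with
  | nil => simp
  | cons pv ps ih =>
    simp only [List.foldl_cons, List.any_cons]
    rw [ih _ (by simp [length_vecs_fold, hj]),
        getD_vecs_fold miss _ dtl j hj d, List.any_map]
    simp only [Function.comp_def]
    by_cases h : pv.2.any (fun visit => pvContAtN miss (PySem.List.pyGetD visit 0 []) j) = true
    · simp only [h, Bool.true_or]
      split <;> simp
    · have h' := eq_false_of_ne_true h
      simp only [h', Bool.false_or, Bool.false_eq_true, if_false]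

-- B's Int-indexed test agrees with the Nat-indexed one on nonnegative indices
theorem pvIsContAt_natCast (data : List (String × List (List (List Int)))) (miss : Int) (j : Nat) :
    pvIsContAt data miss (j : Int) =
      data.any (fun pv => pv.2.any (fun visit => pvContAtN miss (PySem.List.pyGetD visit 0 []) j)) := by
  unfold pvIsContAt pvContAtN
  refine List.any_congr rfl (fun pv => ?_)
  refine List.any_congr rfl (fun visit => ?_)
  simp [PySem.List.pyGetD_natCast]

-- A's finished column-type list IS B's comprehension over range(n)
theorem dtl_eq_types (miss : Int) (data : List (String × List (List (List Int)))) (n : Nat) :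
    (data.foldl (fun dtl pv =>
        (pv.2.map (fun visit => PySem.List.pyGetD visit 0 [])).foldl
          (fun dtl vec => (PySem.List.enumerate vec 0).foldl (pvMark miss) dtl) dtl)
      (List.replicate n "d")) =
    (PySem.List.pyRange 0 (n : Int) 1).map (fun j => if pvIsContAt data miss j then "c" else "d") := by
  rw [PySem.List.pyRange_zero_nat, List.map_map]
  have hlen : (data.foldl (fun dtl pv =>
      (pv.2.map (fun visit => PySem.List.pyGetD visit 0 [])).foldl
        (fun dtl vec => (PySem.List.enumerate vec 0).foldl (pvMark miss) dtl) dtl)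
      (List.replicate n "d")).length = n := by
    rw [length_data_fold]; simp
  apply List.ext_getElem
  · simp [hlen]
  · intro j h1 h2
    have hj : j < n := by simpa [hlen] using h1
    have hgd : ∀ (xs : List String) (h : j < xs.length), xs[j] = xs.getD j "d" := by
      intro xs h; rw [List.getD_eq_getElem xs "d" h]
    rw [hgd _ h1, getD_data_fold miss data _ j (by simp [hj]) "d"]
    simp only [List.getElem_map, List.getElem_range, Function.comp_apply]
    rw [pvIsContAt_natCast]
    by_cases h : data.any (fun pv => pv.2.any fun visit => pvContAtN miss (PySem.List.pyGetD visit 0 []) j) = true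
    · simp [h]
    · have h' := eq_false_of_ne_true h
      simp [h', hj]

-- ===== VERDICT (by name: the statement is the Claim_ definition above) =====
theorem data_type_identify_spec : Claim_equal_data_type_identify := by
  intro data nid miss _hdom hpre
  obtain ⟨_hnd1, hnd2, _hne, _hrange, _hover⟩ := hpre
  simp only [Spec_data_type_identify, data_type_identify, data_type_identify_alt]
  have key : ∀ (f g : String × Int → String), (∀ kv ∈ nid, f kv = g kv) →
      (nid.foldl (fun d kv => d.insert kv.1 (f kv)) PySem.Dict.empty).items =
        (nid.foldl (fun d kv => d.insert kv.1 (g kv)) PySem.Dict.empty).items := by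
    intro f g hfg
    rw [PySem.Dict.items_foldl_insert_fresh nid (fun kv => kv.1) f PySem.Dict.empty
          (fun kv _ => by simp [PySem.Dict.contains_empty]) hnd2,
        PySem.Dict.items_foldl_insert_fresh nid (fun kv => kv.1) g PySem.Dict.empty
          (fun kv _ => by simp [PySem.Dict.contains_empty]) hnd2]
    refine congrArg _ (List.map_congr_left fun kv hkv => ?_)
    rw [hfg kv hkv]
  apply key
  intro kv _
  rw [dtl_eq_types miss data nid.length]
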